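-- pv_equiv track=rewrite | github.com/TaimoorAleem/AICricketCoach_CapstoneProject | VideoProcessing/BallLineandLength.py | detect_bounce_point
-- ===== SOURCE A (Python) =====
-- def smooth_trajectory(coordinates):
--     smoothed = [coordinates[0]]
--     for i in range(1, len(coordinates)):
--         if coordinates[i] != coordinates[i-1]:
--             smoothed.append(coordinates[i])
--     return smoothed
--
-- def detect_bounce_point(coordinates):
--     smoothed_coords = smooth_trajectory(coordinates)
--     x_coords = [coord[0] for coord in smoothed_coords]
--     y_coords = [coord[1] for coord in smoothed_coords]
--
--     for i in range(1, len(y_coords)-2):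
--         if y_coords[i] > y_coords[i-1]:
--             if y_coords[i+1] > y_coords[i] and y_coords[i+2] < y_coords[i+1]:
--                 original_index = coordinates.index(smoothed_coords[i])
--                 return coordinates[original_index], original_index
--     return coordinates[-1], len(coordinates)-1
-- ===== SOURCE B (Python) =====
-- def detect_bounce_point(coordinates):
--     # Single streaming pass: keep a sliding buffer of the last <=4 distinct
--     # consecutive points; on the first bounce-shaped window return immediately.
--     buf = []
--     for p in coordinates:
--         if not buf or p != buf[-1]:
--             buf.append(p)
--             if len(buf) > 4:
--                 buf.pop(0)
--             if len(buf) == 4: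
--                 (_, y0), q1, (_, y2), (_, y3) = buf
--                 if q1[1] > y0 and y2 > q1[1] and y3 < y2:
--                     j = coordinates.index(q1)
--                     return coordinates[j], j
--     return coordinates[-1], len(coordinates) - 1
-- ===== Notes on version B (the rewrite author's own statement) =====
-- stated objective: alternative
-- what changed: A first materialises the whole deduplicated trajectory and then index-scans it with repeated list indexing; B is a single streaming pass over the raw coordinates that maintains only a 4-element sliding buffer of the last distinct points and returns at the first bounce-shaped window.
import Mathlib
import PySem

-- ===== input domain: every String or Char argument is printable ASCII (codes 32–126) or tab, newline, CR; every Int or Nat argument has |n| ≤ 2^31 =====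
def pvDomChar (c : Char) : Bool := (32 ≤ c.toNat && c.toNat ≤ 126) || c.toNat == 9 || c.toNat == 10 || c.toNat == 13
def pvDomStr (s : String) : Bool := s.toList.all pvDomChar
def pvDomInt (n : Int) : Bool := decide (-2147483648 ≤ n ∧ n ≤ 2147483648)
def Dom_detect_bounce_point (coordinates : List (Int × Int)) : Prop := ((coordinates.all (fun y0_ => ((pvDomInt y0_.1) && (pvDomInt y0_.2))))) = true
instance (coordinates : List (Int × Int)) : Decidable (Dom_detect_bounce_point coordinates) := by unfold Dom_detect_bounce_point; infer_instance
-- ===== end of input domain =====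

-- B replaces A's build-then-scan (full smoothed list, index loop) by one streaming pass
-- with a 4-point sliding buffer of distinct points; alternative decomposition, same cost.


-- ===== PORT A =====
def smooth_trajectory (coordinates : List (Int × Int)) : List (Int × Int) :=
  (PySem.List.pyRange 1 (coordinates.length : Int) 1).foldl
    (fun smoothed i =>
      if PySem.List.pyGetD coordinates i (0, 0) ≠ PySem.List.pyGetD coordinates (i - 1) (0, 0) then
        smoothed ++ [PySem.List.pyGetD coordinates i (0, 0)]
      else smoothed)
    [PySem.List.pyGetD coordinates 0 (0, 0)]

def detect_bounce_point (coordinates : List (Int × Int)) : (Int × Int) × Int :=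
  let smoothed_coords := smooth_trajectory coordinates
  let y_coords := smoothed_coords.map (fun coord => coord.2)
  let res :=
    (PySem.List.pyRange 1 ((y_coords.length : Int) - 2) 1).foldl
      (fun acc i =>
        match acc with
        | some r => some r
        | none =>
          if PySem.List.pyGetD y_coords i 0 > PySem.List.pyGetD y_coords (i - 1) 0 then
            if PySem.List.pyGetD y_coords (i + 1) 0 > PySem.List.pyGetD y_coords i 0 ∧
               PySem.List.pyGetD y_coords (i + 2) 0 < PySem.List.pyGetD y_coords (i + 1) 0 then
              let original_index : Int :=
                (((PySem.List.index? coordinates (PySem.List.pyGetD smoothed_coords i (0, 0))).getD 0 : Nat) : Int)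
              some (PySem.List.pyGetD coordinates original_index (0, 0), original_index)
            else none
          else none)
      none
  match res with
  | some r => r
  | none => (PySem.List.pyGetD coordinates (-1) (0, 0), (coordinates.length : Int) - 1)

-- ===== PORT B =====
def bounceScan (coordinates : List (Int × Int)) :
    List (Int × Int) → List (Int × Int) → Option ((Int × Int) × Int)
  | _, [] => none
  | buf, p :: rest =>
    if buf.getLast? = some p then bounceScan coordinates buf rest
    else
      let buf1 := buf ++ [p]
      let buf2 := if buf1.length > 4 then buf1.tail else buf1
      match buf2 with
      | [p0, p1, p2, p3] =>
        if p1.2 > p0.2 ∧ p2.2 > p1.2 ∧ p3.2 < p2.2 then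
          let j : Int := (((PySem.List.index? coordinates p1).getD 0 : Nat) : Int)
          some (PySem.List.pyGetD coordinates j (0, 0), j)
        else bounceScan coordinates [p0, p1, p2, p3] rest
      | other => bounceScan coordinates other rest

def detect_bounce_point_alt (coordinates : List (Int × Int)) : (Int × Int) × Int :=
  match bounceScan coordinates [] coordinates with
  | some r => r
  | none => (PySem.List.pyGetD coordinates (-1) (0, 0), (coordinates.length : Int) - 1)

-- ===== PRECONDITION & SPEC =====
-- Pre_ excludes only the empty list, on which the Python A raises IndexError (coordinates[0]).
def Pre_detect_bounce_point (coordinates : List (Int × Int)) : Prop := coordinates ≠ []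
instance (coordinates : List (Int × Int)) : Decidable (Pre_detect_bounce_point coordinates) := by unfold Pre_detect_bounce_point; infer_instance
def pvWitness_detect_bounce_point : (List (Int × Int)) := [(0, 2), (1, 3), (2, 1), (3, 0)]

def Spec_detect_bounce_point (coordinates : List (Int × Int)) (out : (Int × Int) × Int) : Prop := out = detect_bounce_point_alt coordinates
instance (coordinates : List (Int × Int)) (out : (Int × Int) × Int) : Decidable (Spec_detect_bounce_point coordinates out) := by unfold Spec_detect_bounce_point; infer_instance

-- ===== CLAIM (what is proved, stated in full; the proofs are below) =====
def Claim_equal_detect_bounce_point : Prop := ∀ (coordinates : List (Int × Int)), Dom_detect_bounce_point coordinates → Pre_detect_bounce_point coordinates → Spec_detect_bounce_point coordinates (detect_bounce_point coordinates)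

-- ===== LEMMAS AND PROOFS =====

-- consecutive-deduplication tail: the elements A's smoothing appends after the one kept last
def ddTail : (Int × Int) → List (Int × Int) → List (Int × Int)
  | _, [] => []
  | a, b :: t => if b = a then ddTail a t else b :: ddTail b t

-- first bounce-shaped 4-window of a list, returning its second point
def findWin : List (Int × Int) → Option (Int × Int)
  | p0 :: p1 :: p2 :: p3 :: rest =>
    if p1.2 > p0.2 ∧ p2.2 > p1.2 ∧ p3.2 < p2.2 then some p1
    else findWin (p1 :: p2 :: p3 :: rest)
  | _ => none

-- the value both programs return once the bounce point p1 is found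
def hres (cs : List (Int × Int)) (p1 : Int × Int) : (Int × Int) × Int :=
  let j : Int := (((PySem.List.index? cs p1).getD 0 : Nat) : Int)
  (PySem.List.pyGetD cs j (0, 0), j)

theorem pyGetD_app {α : Type} (pre suf : List α) (k : Nat) (hk : k < suf.length) (d : α) :
    PySem.List.pyGetD (pre ++ suf) ((pre.length + k : Nat) : Int) d = suf[k] := by
  rw [PySem.List.pyGetD_natCast, List.getD_eq_getElem?_getD,
    List.getElem?_append_right (by omega)]
  simp [hk]

theorem pyGetD_app_map (pre suf : List (Int × Int)) (k : Nat) (hk : k < suf.length) :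
    PySem.List.pyGetD ((pre ++ suf).map (fun coord => coord.2)) ((pre.length + k : Nat) : Int) 0 = (suf[k]).2 := by
  rw [List.map_append]
  have h2 := pyGetD_app (pre.map (fun (coord : Int × Int) => coord.2))
    (suf.map (fun (coord : Int × Int) => coord.2)) k (by simpa using hk) 0
  simpa using h2

theorem findWin_short (l : List (Int × Int)) (h : l.length ≤ 3) : findWin l = none := by
  match l with
  | [] => rfl
  | [_] => rfl
  | [_, _] => rfl
  | [_, _, _] => rfl
  | _ :: _ :: _ :: _ :: _ => simp at h; omega

theorem smooth_aux (cs : List (Int × Int)) :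
    ∀ (t pre : List (Int × Int)) (a : Int × Int) (acc : List (Int × Int)),
      cs = pre ++ a :: t →
      (PySem.List.pyRange ((pre.length : Int) + 1) (cs.length : Int) 1).foldl
        (fun smoothed i =>
          if PySem.List.pyGetD cs i (0, 0) ≠ PySem.List.pyGetD cs (i - 1) (0, 0) then
            smoothed ++ [PySem.List.pyGetD cs i (0, 0)]
          else smoothed)
        acc = acc ++ ddTail a t := by
  intro t
  induction t with
  | nil =>
    intro pre a acc h
    rw [PySem.List.pyRange_one_eq_nil (by subst h; simp)]
    simp [ddTail]
  | cons b t ih =>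
    intro pre a acc h
    have hlen : ((pre.length : Int) + 1) < (cs.length : Int) := by subst h; simp
    rw [PySem.List.pyRange_one_cons hlen, List.foldl_cons]
    have e0 : (pre.length : Int) + 1 - 1 = ((pre.length + 0 : Nat) : Int) := by push_cast; ring
    have e1 : (pre.length : Int) + 1 = ((pre.length + 1 : Nat) : Int) := by push_cast; ring
    have h0 : PySem.List.pyGetD cs ((pre.length : Int) + 1 - 1) (0, 0) = a := by
      subst h
      rw [e0, pyGetD_app pre (a :: b :: t) 0 (by simp) (0, 0)]
      all_goals rfl
    have h1 : PySem.List.pyGetD cs ((pre.length : Int) + 1) (0, 0) = b := by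
      subst h
      rw [e1, pyGetD_app pre (a :: b :: t) 1 (by simp) (0, 0)]
      all_goals rfl
    simp only [h0, h1]
    by_cases hba : b = a
    · subst hba
      rw [if_neg (by simp)]
      have h2 := ih (pre ++ [b]) b acc (by simp [h])
      have er : (((pre ++ [b]).length : Nat) : Int) + 1 = (pre.length : Int) + 1 + 1 := by simp
      rw [er] at h2
      rw [h2]
      simp [ddTail]
    · rw [if_pos hba]
      have h2 := ih (pre ++ [a]) b (acc ++ [b]) (by simp [h])
      have er : (((pre ++ [a]).length : Nat) : Int) + 1 = (pre.length : Int) + 1 + 1 := by simp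
      rw [er] at h2
      rw [h2]
      simp [ddTail, hba]

theorem smooth_eq (c : Int × Int) (t : List (Int × Int)) :
    smooth_trajectory (c :: t) = c :: ddTail c t := by
  have h2 := smooth_aux (c :: t) t [] c [PySem.List.pyGetD (c :: t) 0 (0, 0)] rfl
  simp only [List.length_nil, Nat.cast_zero, zero_add] at h2
  unfold smooth_trajectory
  rw [h2]
  simp [PySem.List.pyGetD_zero_cons]

-- A's inner loop body, with the smoothed list s and the original list cs explicit
def gA (cs s : List (Int × Int)) (acc : Option ((Int × Int) × Int)) (i : Int) :
    Option ((Int × Int) × Int) :=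
  match acc with
  | some r => some r
  | none =>
    let y := s.map (fun coord => coord.2)
    if PySem.List.pyGetD y i 0 > PySem.List.pyGetD y (i - 1) 0 then
      if PySem.List.pyGetD y (i + 1) 0 > PySem.List.pyGetD y i 0 ∧
         PySem.List.pyGetD y (i + 2) 0 < PySem.List.pyGetD y (i + 1) 0 then
        some (hres cs (PySem.List.pyGetD s i (0, 0)))
      else none
    else none

theorem portA_as_gA (cs : List (Int × Int)) :
    detect_bounce_point cs =
      match (PySem.List.pyRange 1 ((((smooth_trajectory cs).map (fun coord => coord.2)).length : Int) - 2) 1).foldl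
          (gA cs (smooth_trajectory cs)) none with
      | some r => r
      | none => (PySem.List.pyGetD cs (-1) (0, 0), (cs.length : Int) - 1) := rfl

theorem gA_some (cs s : List (Int × Int)) (r : (Int × Int) × Int) (l : List Int) :
    l.foldl (gA cs s) (some r) = some r := by
  induction l with
  | nil => rfl
  | cons x l ih => rw [List.foldl_cons]; exact ih

theorem mainA_aux (cs s : List (Int × Int)) :
    ∀ (u pre : List (Int × Int)) (a : Int × Int),
      s = pre ++ a :: u →
      (PySem.List.pyRange ((pre.length : Int) + 1) ((s.length : Int) - 2) 1).foldl
        (gA cs s) none = (findWin (a :: u)).map (hres cs) := by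
  intro u
  induction u with
  | nil =>
    intro pre a h
    rw [PySem.List.pyRange_one_eq_nil (by subst h; simp)]
    rfl
  | cons b u1 ih =>
    intro pre a h
    match u1, ih with
    | [], _ =>
      rw [PySem.List.pyRange_one_eq_nil (by subst h; simp)]
      rfl
    | [c0], _ =>
      rw [PySem.List.pyRange_one_eq_nil (by subst h; simp; omega)]
      rfl
    | c0 :: d0 :: u', ih =>
      have hlen : ((pre.length : Int) + 1) < ((s.length : Int) - 2) := by subst h; simp; omega
      rw [PySem.List.pyRange_one_cons hlen, List.foldl_cons]
      have key : ∀ (k : Nat) (hk : k < (a :: b :: c0 :: d0 :: u').length),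
          PySem.List.pyGetD (s.map (fun coord => coord.2)) ((pre.length : Int) + (k : Int)) 0
            = ((a :: b :: c0 :: d0 :: u')[k]).2 := by
        intro k hk
        subst h
        rw [show ((pre.length : Int) + (k : Int)) = ((pre.length + k : Nat) : Int) by push_cast; ring]
        exact pyGetD_app_map pre _ k hk
      have hsElem : PySem.List.pyGetD s ((pre.length : Int) + 1) (0, 0) = b := by
        subst h
        rw [show ((pre.length : Int) + 1) = ((pre.length + 1 : Nat) : Int) by push_cast; ring]
        rw [pyGetD_app pre (a :: b :: c0 :: d0 :: u') 1 (by simp) (0, 0)]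
        rfl
      have ka := key 0 (by simp)
      have kb := key 1 (by simp)
      have kc := key 2 (by simp)
      have kd := key 3 (by simp)
      simp only [List.getElem_cons_zero, List.getElem_cons_succ, Nat.cast_zero, Nat.cast_one,
        Nat.cast_ofNat, add_zero] at ka kb kc kd
      have eb : (pre.length : Int) + 1 - 1 = (pre.length : Int) := by ring
      have ec : (pre.length : Int) + 1 + 1 = (pre.length : Int) + 2 := by ring
      have ed : (pre.length : Int) + 1 + 2 = (pre.length : Int) + 3 := by ring
      show List.foldl (gA cs s) (gA cs s none ((pre.length : Int) + 1)) _ = _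
      rw [show gA cs s none ((pre.length : Int) + 1) =
          (if a.2 < b.2 then
            (if b.2 < c0.2 ∧ d0.2 < c0.2 then some (hres cs b) else none)
          else none) by
        simp only [gA, eb, ec, ed, ka, kb, kc, kd, hsElem, gt_iff_lt]]
      by_cases hP : a.2 < b.2
      · by_cases hQ : b.2 < c0.2 ∧ d0.2 < c0.2
        · rw [if_pos hP, if_pos hQ, gA_some]
          rw [show findWin (a :: b :: c0 :: d0 :: u') = some b from
            by rw [findWin]; rw [if_pos ⟨hP, hQ.1, hQ.2⟩]]
          rfl
        · rw [if_pos hP, if_neg hQ]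
          rw [show findWin (a :: b :: c0 :: d0 :: u') = findWin (b :: c0 :: d0 :: u') from
            by rw [findWin]; rw [if_neg (fun hc => hQ ⟨hc.2.1, hc.2.2⟩)]]
          have h2 := ih (pre ++ [a]) b (by simp [h])
          have er : (((pre ++ [a]).length : Nat) : Int) + 1 = (pre.length : Int) + 1 + 1 := by simp
          rw [er] at h2
          exact h2
      · rw [if_neg hP]
        rw [show findWin (a :: b :: c0 :: d0 :: u') = findWin (b :: c0 :: d0 :: u') from
          by rw [findWin]; rw [if_neg (fun hc => hP hc.1)]]
        have h2 := ih (pre ++ [a]) b (by simp [h])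
        have er : (((pre ++ [a]).length : Nat) : Int) + 1 = (pre.length : Int) + 1 + 1 := by simp
        rw [er] at h2
        exact h2

theorem detectA_eq (c : Int × Int) (t : List (Int × Int)) :
    detect_bounce_point (c :: t) =
      match findWin (c :: ddTail c t) with
      | some p1 => hres (c :: t) p1
      | none => (PySem.List.pyGetD (c :: t) (-1) (0, 0), ((c :: t).length : Int) - 1) := by
  rw [portA_as_gA, smooth_eq]
  have h2 := mainA_aux (c :: t) (c :: ddTail c t) (ddTail c t) [] c rfl
  simp only [List.length_nil, Nat.cast_zero, zero_add] at h2
  rw [List.length_map, h2]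
  cases findWin (c :: ddTail c t) <;> rfl

theorem bounce_aux (cs : List (Int × Int)) :
    ∀ (rest buf : List (Int × Int)) (a : Int × Int),
      buf.getLast? = some a → buf.length ≤ 4 →
      bounceScan cs buf rest =
        (findWin ((if buf.length = 4 then buf.tail else buf) ++ ddTail a rest)).map (hres cs) := by
  intro rest
  induction rest with
  | nil =>
    intro buf a hlast hle
    have hlen : ((if buf.length = 4 then buf.tail else buf) ++ ddTail a []).length ≤ 3 := by
      by_cases h : buf.length = 4 <;> simp [h, ddTail] ; omega
    rw [show bounceScan cs buf [] = none from rfl, findWin_short _ hlen]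
    rfl
  | cons p rest ih =>
    intro buf a hlast hle
    by_cases hskip : buf.getLast? = some p
    · have hpa : p = a := by rw [hlast] at hskip; exact (Option.some.inj hskip).symm
      rw [show bounceScan cs buf (p :: rest) = bounceScan cs buf rest from by
            rw [bounceScan, if_pos hskip],
          ih buf a hlast hle,
          show ddTail a (p :: rest) = ddTail a rest from by rw [ddTail, if_pos hpa]]
    · have hpa : ¬ p = a := fun hp => hskip (by rw [hp]; exact hlast)
      have hddt : ddTail a (p :: rest) = p :: ddTail p rest := by rw [ddTail, if_neg hpa]
      match buf, hlast, hle, hskip with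
      | [q1], hlast, hle, hskip =>
        have ha : q1 = a := by simpa using hlast
        subst ha
        rw [show bounceScan cs [q1] (p :: rest) = bounceScan cs [q1, p] rest from by
              rw [bounceScan, if_neg hskip]; rfl,
            ih [q1, p] p (by simp) (by simp), hddt]
        simp
      | [q1, q2], hlast, hle, hskip =>
        have ha : q2 = a := by simpa using hlast
        subst ha
        rw [show bounceScan cs [q1, q2] (p :: rest) = bounceScan cs [q1, q2, p] rest from by
              rw [bounceScan, if_neg hskip]; rfl,
            ih [q1, q2, p] p (by simp) (by simp), hddt]
        simp
      | [q1, q2, q3], hlast, hle, hskip =>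
        have ha : q3 = a := by simpa using hlast
        subst ha
        rw [hddt, if_neg (by simp)]
        simp only [List.cons_append, List.nil_append]
        by_cases hc : q2.2 > q1.2 ∧ q3.2 > q2.2 ∧ p.2 < q3.2
        · rw [show bounceScan cs [q1, q2, q3] (p :: rest) =
                some (PySem.List.pyGetD cs (((PySem.List.index? cs q2).getD 0 : Nat) : Int) (0, 0),
                  (((PySem.List.index? cs q2).getD 0 : Nat) : Int)) from by
              rw [bounceScan, if_neg hskip]
              show (if q2.2 > q1.2 ∧ q3.2 > q2.2 ∧ p.2 < q3.2 then _
                    else bounceScan cs [q1, q2, q3, p] rest) = _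
              rw [if_pos hc]]
          rw [show findWin (q1 :: q2 :: q3 :: p :: ddTail p rest) = some q2 from by
              rw [findWin, if_pos hc]]
          rfl
        · rw [show bounceScan cs [q1, q2, q3] (p :: rest) = bounceScan cs [q1, q2, q3, p] rest from by
              rw [bounceScan, if_neg hskip]
              show (if q2.2 > q1.2 ∧ q3.2 > q2.2 ∧ p.2 < q3.2 then _
                    else bounceScan cs [q1, q2, q3, p] rest) = _
              rw [if_neg hc],
            ih [q1, q2, q3, p] p (by simp) (by simp)]
          rw [show findWin (q1 :: q2 :: q3 :: p :: ddTail p rest) = findWin (q2 :: q3 :: p :: ddTail p rest) from by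
              rw [findWin, if_neg hc]]
          simp
      | [q1, q2, q3, q4], hlast, hle, hskip =>
        have ha : q4 = a := by simpa using hlast
        subst ha
        rw [hddt, if_pos (by simp)]
        by_cases hc : q3.2 > q2.2 ∧ q4.2 > q3.2 ∧ p.2 < q4.2
        · rw [show bounceScan cs [q1, q2, q3, q4] (p :: rest) =
                some (PySem.List.pyGetD cs (((PySem.List.index? cs q3).getD 0 : Nat) : Int) (0, 0),
                  (((PySem.List.index? cs q3).getD 0 : Nat) : Int)) from by
              rw [bounceScan, if_neg hskip]
              show (if q3.2 > q2.2 ∧ q4.2 > q3.2 ∧ p.2 < q4.2 then _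
                    else bounceScan cs [q2, q3, q4, p] rest) = _
              rw [if_pos hc]]
          rw [show findWin ([q1, q2, q3, q4].tail ++ p :: ddTail p rest) = some q3 from by
              rw [show [q1, q2, q3, q4].tail ++ p :: ddTail p rest
                    = q2 :: q3 :: q4 :: p :: ddTail p rest from rfl, findWin, if_pos hc]]
          rfl
        · rw [show bounceScan cs [q1, q2, q3, q4] (p :: rest) = bounceScan cs [q2, q3, q4, p] rest from by
              rw [bounceScan, if_neg hskip]
              show (if q3.2 > q2.2 ∧ q4.2 > q3.2 ∧ p.2 < q4.2 then _
                    else bounceScan cs [q2, q3, q4, p] rest) = _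
              rw [if_neg hc],
            ih [q2, q3, q4, p] p (by simp) (by simp)]
          rw [show findWin ([q1, q2, q3, q4].tail ++ p :: ddTail p rest)
                = findWin (q3 :: q4 :: p :: ddTail p rest) from by
              rw [show [q1, q2, q3, q4].tail ++ p :: ddTail p rest
                    = q2 :: q3 :: q4 :: p :: ddTail p rest from rfl, findWin, if_neg hc]]
          simp

theorem detectB_eq (c : Int × Int) (t : List (Int × Int)) :
    detect_bounce_point_alt (c :: t) =
      match findWin (c :: ddTail c t) with
      | some p1 => hres (c :: t) p1
      | none => (PySem.List.pyGetD (c :: t) (-1) (0, 0), ((c :: t).length : Int) - 1) := by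
  unfold detect_bounce_point_alt
  rw [show bounceScan (c :: t) [] (c :: t) = bounceScan (c :: t) [c] t from by
        rw [bounceScan, if_neg (by simp)]; rfl,
      bounce_aux (c :: t) t [c] c (by simp) (by simp), if_neg (by simp), List.singleton_append]
  cases findWin (c :: ddTail c t) <;> rfl

-- ===== VERDICT (by name: the statement is the Claim_ definition above) =====
theorem detect_bounce_point_spec : Claim_equal_detect_bounce_point := by
  intro coordinates _ hpre
  match coordinates with
  | [] => exact absurd rfl hpre
  | c :: t =>
    unfold Spec_detect_bounce_point
    rw [detectA_eq, detectB_eq]
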